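-- pv_equiv track=rewrite | github.com/Daniel-Anastacio/Questoes-python | questao1.py | fix_start
-- ===== SOURCE A (Python) =====
-- def fix_start(s):
--   '''SALVAMOS A LETRA INICIAL EM UMA VARIÁVEL LOCAL'''
--   x= s[0]
--   '''TROCAMOS TODAS AS LETRAS IGUAIS A PRIMEIRA POR ASTERISCO INCLUSIVE ESTA'''
--   s = s.replace(s[0], "*")
--   '''AQUI PERCORREMOS DE MODO INDIRETO A STRING EXCETO A PRIMEIRA LETRA'''
--   for i in range(1, len(s)):
--     '''AGORA ACESSAMOS A VARIÁVEL SALVA E CONCATENAMOS FORMANDO A PALAVRA DESEJADA'''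
--     x = x+s[i]
--   return x
--   pass
-- ===== SOURCE B (Python) =====
-- def fix_start(s):
--     return s[0] + ''.join('*' if c == s[0] else c for c in s[1:])
-- ===== Notes on version B (the rewrite author's own statement) =====
-- stated objective: simpler
-- what changed: Drops the global str.replace followed by the index-by-index copy loop; B keeps the first character and builds the result in one per-character pass over the tail, emitting an asterisk exactly when a character equals the first one.
import Mathlib
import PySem

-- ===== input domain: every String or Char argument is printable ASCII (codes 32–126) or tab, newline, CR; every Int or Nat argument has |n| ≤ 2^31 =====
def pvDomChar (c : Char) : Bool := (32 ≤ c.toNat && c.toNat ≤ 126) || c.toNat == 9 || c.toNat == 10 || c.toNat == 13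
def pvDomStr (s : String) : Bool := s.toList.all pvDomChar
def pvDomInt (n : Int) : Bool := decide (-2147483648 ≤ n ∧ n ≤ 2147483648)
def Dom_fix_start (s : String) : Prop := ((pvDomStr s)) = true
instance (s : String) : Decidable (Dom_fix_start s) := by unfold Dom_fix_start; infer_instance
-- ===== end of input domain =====

-- B replaces A's global str.replace + index loop by a single per-character pass over the tail; objective: simpler.

-- ===== PORT A =====
-- A: x = s[0]; s = s.replace(s[0], "*"); for i in range(1, len(s)): x = x + s[i]; return x
def fix_start (s : String) : String :=
  match PySem.Str.pyGet? s 0 with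
  | none => ""   -- s[0] raises IndexError on the empty string; excluded by Pre_
  | some c0 =>
    let t : List Char := PySem.Chars.replace s.toList [c0] ['*']
    let x : List Char :=
      (PySem.List.pyRange 1 (t.length : Int) 1).foldl
        (fun acc i => acc ++ [PySem.List.pyGetD t i ' ']) [c0]
    String.ofList x

-- ===== PORT B =====
-- B: return s[0] + ''.join('*' if c == s[0] else c for c in s[1:])
def fix_start_alt (s : String) : String :=
  match s.toList with
  | [] => ""   -- s[0] raises IndexError on the empty string; excluded by Pre_
  | c0 :: rest => String.ofList (c0 :: rest.map (fun c => if c == c0 then '*' else c))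

-- ===== PRECONDITION & SPEC =====
-- A (and B) raise IndexError at s[0] on the empty string; Pre_ excludes exactly that input.
def Pre_fix_start (s : String) : Prop := s ≠ ""
instance (s : String) : Decidable (Pre_fix_start s) := by unfold Pre_fix_start; infer_instance
def pvWitness_fix_start : String := "banana"

def Spec_fix_start (s : String) (out : String) : Prop := out = fix_start_alt s
instance (s : String) (out : String) : Decidable (Spec_fix_start s out) := by unfold Spec_fix_start; infer_instance

-- ===== CLAIM (what is proved, stated in full; the proofs are below) =====
def Claim_equal_fix_start : Prop := ∀ (s : String), Dom_fix_start s → Pre_fix_start s → Spec_fix_start s (fix_start s)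

-- ===== LEMMAS AND PROOFS =====

-- Single-character replace is a character map (specific to A's call replace(s, s[0], "*")).
theorem replace_go_single (c0 : Char) (l acc : List Char) (fuel : Nat) (h : l.length ≤ fuel) :
    PySem.Chars.replace.go [c0] ['*'] fuel l acc
      = acc.reverse ++ l.map (fun c => if c = c0 then '*' else c) := by
  induction l generalizing fuel acc with
  | nil =>
    cases fuel <;> simp [PySem.Chars.replace.go]
  | cons c t ih =>
    cases fuel with
    | zero => simp at h
    | succ n =>
      simp only [List.length_cons, Nat.succ_le_succ_iff] at h
      rw [PySem.Chars.replace.go]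
      by_cases hc : c = c0
      · subst hc
        simp only [List.isPrefixOf, BEq.rfl, Bool.true_and, if_true]
        simp only [List.length_cons, List.length_nil, List.drop_succ_cons, List.drop_zero]
        rw [ih _ _ h]
        simp
      · have : List.isPrefixOf [c0] (c :: t) = false := by
          simp [List.isPrefixOf]
          exact fun hh => absurd hh.symm hc
        rw [this]
        simp only [Bool.false_eq_true, if_false]
        rw [ih _ _ h]
        simp [hc]

theorem replace_single (c0 : Char) (l : List Char) :
    PySem.Chars.replace l [c0] ['*'] = l.map (fun c => if c = c0 then '*' else c) := by
  rw [PySem.Chars.replace]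
  simp only [List.isEmpty_cons, Bool.false_eq_true, if_false]
  rw [replace_go_single c0 l [] l.length le_rfl]
  simp

-- ===== VERDICT (by name: the statement is the Claim_ definition above) =====
theorem fix_start_spec : Claim_equal_fix_start := by
  intro s _ hpre
  unfold Spec_fix_start fix_start fix_start_alt
  have hne : s.toList ≠ [] := fun h => hpre (String.toList_eq_nil_iff.mp h)
  obtain ⟨c0, rest, hl⟩ := List.exists_cons_of_ne_nil hne
  have hget : PySem.Str.pyGet? s 0 = some c0 := by
    simp [hl]
  rw [hget, hl]
  simp only []
  rw [replace_single]
  have hmap : (c0 :: rest).map (fun c => if c = c0 then '*' else c)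
      = '*' :: rest.map (fun c => if c = c0 then '*' else c) := by simp
  rw [hmap]
  rw [PySem.List.foldl_pyRange_pyGetD' ('*' :: rest.map (fun c => if c = c0 then '*' else c)) ' '
        (fun acc c => acc ++ [c]) [c0] (a := 1) (by norm_num)]
  congr 1
  rw [show Int.toNat 1 = 1 from rfl]
  simp only [List.drop_succ_cons, List.drop_zero]
  rw [PySem.List.foldl_append_singleton]
  simp
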